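-- pv_equiv track=rewrite | github.com/DmitryErofeev/netmiko-helper | tests/test_enable_lldp.py | get_untagged_ports
-- ===== SOURCE A (Python) =====
-- def get_untagged_ports(data):
--     list_ports = []
--     pos = 0
--     while pos != -1:
--         port = data.find('1', pos)
--         if port == -1:
--             pos = -1
--         else:
--             list_ports.append(port + 1)
--             pos = port + 1
--     return list_ports
-- ===== SOURCE B (Python) =====
-- def get_untagged_ports(data):
--     return [i + 1 for i, c in enumerate(data) if c == '1']
-- ===== Notes on version B (the rewrite author's own statement) =====
-- stated objective: idiomatic
-- what changed: Replaces the str.find jump-to-next-match loop with -1 sentinel and pos bookkeeping by a single enumerate comprehension that inspects every character once.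
import Mathlib
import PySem

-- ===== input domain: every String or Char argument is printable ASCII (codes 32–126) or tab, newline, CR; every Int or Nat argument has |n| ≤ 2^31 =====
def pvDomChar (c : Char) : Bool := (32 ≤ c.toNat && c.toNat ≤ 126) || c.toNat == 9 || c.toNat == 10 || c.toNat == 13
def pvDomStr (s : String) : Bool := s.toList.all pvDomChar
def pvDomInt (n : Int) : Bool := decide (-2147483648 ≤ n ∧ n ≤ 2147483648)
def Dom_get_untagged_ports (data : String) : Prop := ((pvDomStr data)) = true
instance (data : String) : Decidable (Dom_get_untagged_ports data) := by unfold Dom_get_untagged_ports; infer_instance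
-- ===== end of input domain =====

-- B replaces A's str.find jump-to-next-match loop (with -1 sentinel and pos bookkeeping)
-- by one enumerate comprehension inspecting each character; objective: idiomatic.

-- ===== PORT A =====
-- while pos != -1: port = data.find('1', pos); … — ported with a fuel guard (fuel only makes the
-- recursion total; data.length + 1 steps always suffice, proved in the lemmas below)
def get_untagged_ports_go (data : String) (fuel : Nat) (pos : Int) (acc : List Int) : List Int :=
  match fuel with
  | 0 => acc
  | fuel + 1 =>
    let port := PySem.Str.findFrom data "1" pos none
    if port = -1 then acc
    else get_untagged_ports_go data fuel (port + 1) (acc ++ [port + 1])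

def get_untagged_ports (data : String) : List Int :=
  get_untagged_ports_go data (data.toList.length + 1) 0 []

-- ===== PORT B =====
-- [i + 1 for i, c in enumerate(data) if c == '1']
def get_untagged_ports_alt (data : String) : List Int :=
  (PySem.List.enumerate data.toList 0).filterMap
    (fun ic => if ic.2 = '1' then some (ic.1 + 1) else none)

-- ===== PRECONDITION & SPEC =====
def Spec_get_untagged_ports (data : String) (out : List Int) : Prop := out = get_untagged_ports_alt data
instance (data : String) (out : List Int) : Decidable (Spec_get_untagged_ports data out) := by unfold Spec_get_untagged_ports; infer_instance

-- ===== CLAIM (what is proved, stated in full; the proofs are below) =====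
def Claim_equal_get_untagged_ports : Prop := ∀ (data : String), Dom_get_untagged_ports data → Spec_get_untagged_ports data (get_untagged_ports data)

-- ===== LEMMAS AND PROOFS =====

-- B's comprehension with an arbitrary enumerate start
def pvG (d : List Char) (k : Int) : List Int :=
  (PySem.List.enumerate d k).filterMap (fun ic => if ic.2 = '1' then some (ic.1 + 1) else none)

theorem pvG_nil (k : Int) : pvG [] k = [] := by
  simp [pvG, PySem.List.enumerate_nil]

theorem pvG_cons (c : Char) (t : List Char) (k : Int) :
    pvG (c :: t) k = (if c = '1' then [k + 1] else []) ++ pvG t (k + 1) := by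
  simp [pvG, PySem.List.enumerate_cons, List.filterMap_cons]
  split_ifs <;> simp

theorem pvG_of_not_mem (d : List Char) (k : Int) (h : '1' ∉ d) : pvG d k = [] := by
  induction d generalizing k with
  | nil => exact pvG_nil k
  | cons c t ih =>
    rw [pvG_cons]
    have hc : c ≠ '1' := fun hc => h (by simp [hc])
    simp [hc, ih (k + 1) (fun ht => h (by simp [ht]))]

theorem pvG_first (d : List Char) (m : Nat) (k : Int) (hm : m < d.length)
    (h1 : d[m] = '1') (h0 : ∀ i (hi : i < m), d[i]'(by omega) ≠ '1') :
    pvG d k = (k + m + 1) :: pvG (d.drop (m + 1)) (k + m + 1) := by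
  induction d generalizing m k with
  | nil => simp at hm
  | cons c t ih =>
    cases m with
    | zero =>
      simp at h1
      rw [pvG_cons]
      simp [h1]
    | succ m' =>
      have hc : c ≠ '1' := h0 0 (Nat.succ_pos _)
      rw [pvG_cons, if_neg hc, List.nil_append,
        ih m' (k + 1) (by simpa using hm) (by simpa using h1)
          (fun i hi => by simpa using h0 (i + 1) (by omega))]
      have hdt : List.drop (m' + 1 + 1) (c :: t) = List.drop (m' + 1) t := rfl
      rw [hdt]
      congr 1
      · push_cast; ring
      · congr 1; push_cast; ring

theorem singleton_prefix_drop (d : List Char) (i : Nat) (hi : i < d.length) :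
    (['1'] <+: d.drop i) ↔ d[i] = '1' := by
  constructor
  · rintro ⟨u, hu⟩
    have h2 : (d.drop i)[0]? = some '1' := by rw [← hu]; rfl
    simpa [List.getElem?_drop, List.getElem?_eq_getElem hi] using h2
  · intro h
    refine ⟨d.drop (i + 1), ?_⟩
    rw [List.drop_eq_getElem_cons hi, h]
    rfl

theorem go_eq (fuel : Nat) (data : String) (k : Nat) (acc : List Int)
    (hk : k ≤ data.toList.length) (hf : data.toList.length - k < fuel) :
    get_untagged_ports_go data fuel (k : Int) acc = acc ++ pvG (data.toList.drop k) k := by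
  induction fuel generalizing k acc with
  | zero => omega
  | succ fuel ih =>
    rw [get_untagged_ports_go]
    have hff : PySem.Str.findFrom data "1" (k : Int) none
        = PySem.Chars.findFrom data.toList ['1'] (k : Int) none := by
      simp [PySem.Str.findFrom_eq]
    rw [hff, PySem.Chars.findFrom_natCast data.toList ['1'] k hk]
    set d := data.toList.drop k with hd
    by_cases hneg : PySem.Chars.find d ['1'] = -1
    · have hnm : ¬ ['1'] <:+: d := (PySem.Chars.find_eq_neg_one_iff d ['1']).mp hneg
      have hmem : '1' ∉ d := by
        intro hmem
        obtain ⟨i, hi, hgi⟩ := List.mem_iff_getElem.mp hmem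
        exact hnm ((PySem.Chars.isIn_iff_infix (sub := ['1']) (s := d)).mp
          ((PySem.Chars.exists_prefix_drop_iff_isIn (sub := ['1']) (s := d)).mp
            ⟨i, (singleton_prefix_drop d i hi).mpr hgi⟩))
      rw [if_pos hneg, pvG_of_not_mem d k hmem, List.append_nil]
      simp
    · rw [if_neg hneg]
      have hge : 0 ≤ PySem.Chars.find d ['1'] := by
        have := PySem.Chars.neg_one_le_find d ['1']
        omega
      have hne2 : ¬ ((k : Int) + PySem.Chars.find d ['1'] = -1) := by omega
      rw [if_neg hne2]
      set m := (PySem.Chars.find d ['1']).toNat with hmdef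
      have hmcast : PySem.Chars.find d ['1'] = (m : Int) := by omega
      obtain ⟨hpre, hfirst⟩ := PySem.Chars.find_spec (s := d) (sub := ['1']) hge
      have hmlt : m < d.length := by
        rcases hpre with ⟨u, hu⟩
        have hlen := congrArg List.length hu
        simp [List.length_drop] at hlen
        omega
      have h1 : d[m] = '1' := (singleton_prefix_drop d m hmlt).mp hpre
      have h0 : ∀ i (hi : i < m), d[i]'(by omega) ≠ '1' := by
        intro i hi hcontra
        exact hfirst i hi ((singleton_prefix_drop d i (by omega)).mpr hcontra)
      have hmk : m < data.toList.length - k := by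
        have := hmlt
        rw [hd, List.length_drop] at this
        omega
      rw [hmcast,
        show ((k : Int) + (m : Int) + 1) = ((k + m + 1 : Nat) : Int) by push_cast; ring,
        ih (k + m + 1) _ (by omega) (by omega)]
      have hdrop : data.toList.drop (k + m + 1) = d.drop (m + 1) := by
        rw [hd, List.drop_drop]; congr 1; try omega
      rw [hdrop, pvG_first d m k hmlt h1 h0]
      have hcast : ((k + m + 1 : Nat) : Int) = (k : Int) + m + 1 := by push_cast; try ring
      simp [hcast]

-- ===== VERDICT (by name: the statement is the Claim_ definition above) =====
theorem get_untagged_ports_spec : Claim_equal_get_untagged_ports := by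
  intro data _
  unfold Spec_get_untagged_ports get_untagged_ports get_untagged_ports_alt
  have := go_eq (data.toList.length + 1) data 0 [] (Nat.zero_le _) (by omega)
  simpa [pvG] using this
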